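-- pv_equiv track=rewrite | github.com/iree-org/iree | integrations/tensorflow/bindings/python/pyiree/tf/support/tf_test_utils.py | _named_kwargs_product
-- ===== SOURCE A (Python) =====
-- from typing import Any, Callable, Dict, List, Sequence, Set, Tuple, Type, Union
--
-- def _dictionary_product(dictionary: Dict[Any, Any]) -> List[Dict[Any, Any]]:
--   """Returns a named cartesian product of dictionary's values.
--
--   Converts {'a': [1, 2], 'b': [3, 4]} into
--   [{'a': 1, 'b': 3}, {'a': 1, 'b': 4}, {'a': 2, 'b': 3}, {'a': 2, 'b': 4}]
--   """
--   product = [[]]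
--   for values in dictionary.values():
--     # Iteratively grow the elements of the product.
--     product = [element + [value] for element in product for value in values]
--   dicts = [{k: v for k, v in zip(dictionary, element)} for element in product]
--   return dicts
--
-- def _named_kwargs_product(
--     kwargs_to_values: Dict[str, Sequence[Any]]) -> Dict[str, Dict[str, Any]]:
--   """Splits kwargs_to_values into a Cartesian product of its elements."""
--   # Validate 'kwargs_to_values'
--   if kwargs_to_values is None:
--     kwargs_to_values = dict()  # Use only default kwargs.
--   for kwarg_key, kwarg_values in kwargs_to_values.items():
--     if not isinstance(kwarg_values, Sequence):
--       raise TypeError(f"Expected kwargs_to_values[{repr(kwarg_key)}] to be a "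
--                       f"sequence, but got '{type(kwarg_values)}'")
--
--   # Expand across a Cartesian product.
--   kwargs_product = _dictionary_product(kwargs_to_values)
--   # {'a': 1, 'b': 3} -> "a_1__b_3"
--   dict_to_str = lambda d: "__".join([f"{k}_{v}" for k, v in d.items()])
--   return {dict_to_str(kwargs): kwargs for kwargs in kwargs_product}
-- ===== SOURCE B (Python) =====
-- from typing import Any, Dict, Sequence, Tuple, List
--
--
-- def _strides(items):
--   """Recursively annotate each (key, values) pair with its mixed-radix stride
--   (the product of the lengths of all later value lists); also return the total
--   number of combinations."""
--   if not items:
--     return [], 1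
--   (key, values) = items[0]
--   strides, total = _strides(items[1:])
--   return [(key, values, total)] + strides, len(values) * total
--
--
-- def _named_kwargs_product(
--     kwargs_to_values: Dict[str, Sequence[Any]]) -> Dict[str, Dict[str, Any]]:
--   """Splits kwargs_to_values into a Cartesian product of its elements."""
--   if kwargs_to_values is None:
--     kwargs_to_values = dict()  # Use only default kwargs.
--   for kwarg_key, kwarg_values in kwargs_to_values.items():
--     if not isinstance(kwarg_values, Sequence):
--       raise TypeError(f"Expected kwargs_to_values[{repr(kwarg_key)}] to be a "
--                       f"sequence, but got '{type(kwarg_values)}'")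
--
--   strides, total = _strides(list(kwargs_to_values.items()))
--   result = {}
--   for index in range(total):
--     # Mixed-radix decode of the linear index: the last key varies fastest.
--     combo = {
--         key: values[(index // stride) % len(values)]
--         for key, values, stride in strides
--     }
--     name = "__".join([f"{k}_{v}" for k, v in combo.items()])
--     result[name] = combo
--   return result
-- ===== Notes on version B (the rewrite author's own statement) =====
-- stated objective: alternative
-- what changed: Replaces A's iterative list-growth Cartesian product (repeatedly extending every partial combination) by a mixed-radix decode: a recursive helper annotates each key with its stride, and each combination is reconstructed directly from a single linear index in range(total).
import Mathlib
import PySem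

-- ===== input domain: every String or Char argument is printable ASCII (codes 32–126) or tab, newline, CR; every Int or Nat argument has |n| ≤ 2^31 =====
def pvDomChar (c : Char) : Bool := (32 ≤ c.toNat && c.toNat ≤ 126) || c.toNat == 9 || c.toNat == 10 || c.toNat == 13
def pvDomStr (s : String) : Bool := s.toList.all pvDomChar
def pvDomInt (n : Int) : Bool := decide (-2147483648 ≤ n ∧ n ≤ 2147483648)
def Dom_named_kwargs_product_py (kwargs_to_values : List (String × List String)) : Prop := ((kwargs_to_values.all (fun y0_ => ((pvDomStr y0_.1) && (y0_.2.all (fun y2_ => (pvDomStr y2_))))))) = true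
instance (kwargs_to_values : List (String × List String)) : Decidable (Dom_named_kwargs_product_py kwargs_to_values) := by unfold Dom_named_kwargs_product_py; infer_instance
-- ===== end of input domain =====

-- B replaces A's iterative product growth by a mixed-radix decode of a single linear
-- index (alternative decomposition; same asymptotic cost).

-- ===== PORT A =====
-- A's `_dictionary_product` + `_named_kwargs_product`; the per-key isinstance(Sequence)
-- validation always passes for `List String` values, so it is a no-op on this domain.
def named_kwargs_product_py (kwargs_to_values : List (String × List String)) : List (String × List (String × String)) :=
  -- product = [[]]; for values in dictionary.values(): product = [e + [v] for e in product for v in values]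
  let product := kwargs_to_values.foldl
    (fun prod kv => prod.flatMap (fun element => kv.2.map (fun v => element ++ [v]))) [[]]
  -- dicts = [{k: v for k, v in zip(dictionary, element)} for element in product]
  let dicts := product.map (fun element =>
    PySem.Dict.ofList (List.zip (kwargs_to_values.map Prod.fst) element))
  -- dict_to_str = lambda d: "__".join([f"{k}_{v}" for k, v in d.items()])
  let dict_to_str := fun (d : PySem.Dict String String) =>
    PySem.Str.join "__" (d.items.map (fun kv => kv.1 ++ "_" ++ kv.2))
  -- {dict_to_str(kwargs): kwargs for kwargs in kwargs_product}
  ((dicts.foldl (fun (res : PySem.Dict String (PySem.Dict String String)) kw =>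
      res.insert (dict_to_str kw) kw) PySem.Dict.empty).items).map (fun kv => (kv.1, kv.2.items))

-- ===== PORT B =====
-- B's recursive `_strides` helper
def bStrides : List (String × List String) → List (String × List String × Int) × Int
  | [] => ([], 1)
  | kv :: rest =>
      let st := bStrides rest
      ((kv.1, kv.2, st.2) :: st.1, (kv.2.length : Int) * st.2)

def named_kwargs_product_py_alt (kwargs_to_values : List (String × List String)) : List (String × List (String × String)) :=
  let st := bStrides kwargs_to_values
  -- for index in range(total): combo = {key: values[(index // stride) % len(values)] ...}; result[name] = combo
  ((PySem.List.pyRange 0 st.2 1).foldl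
    (fun (res : PySem.Dict String (PySem.Dict String String)) index =>
      let combo := PySem.Dict.ofList (st.1.map (fun s =>
        (s.1, PySem.List.pyGetD s.2.1
          (PySem.Int.mod (PySem.Int.floordiv index s.2.2) (s.2.1.length : Int)) "")))
      let name := PySem.Str.join "__" (combo.items.map (fun kv => kv.1 ++ "_" ++ kv.2))
      res.insert name combo) PySem.Dict.empty).items.map (fun kv => (kv.1, kv.2.items))

-- ===== PRECONDITION & SPEC =====
def Spec_named_kwargs_product_py (kwargs_to_values : List (String × List String)) (out : List (String × List (String × String))) : Prop := out = named_kwargs_product_py_alt kwargs_to_values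
instance (kwargs_to_values : List (String × List String)) (out : List (String × List (String × String))) : Decidable (Spec_named_kwargs_product_py kwargs_to_values out) := by unfold Spec_named_kwargs_product_py; infer_instance

-- ===== CLAIM (what is proved, stated in full; the proofs are below) =====
def Claim_equal_named_kwargs_product_py : Prop := ∀ (kwargs_to_values : List (String × List String)), Dom_named_kwargs_product_py kwargs_to_values → Spec_named_kwargs_product_py kwargs_to_values (named_kwargs_product_py kwargs_to_values)

-- ===== LEMMAS AND PROOFS =====

-- proof-side: the structural Cartesian product of the value lists
def vCart : List (String × List String) → List (List String)
  | [] => [[]]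
  | kv :: rest => kv.2.flatMap (fun v => (vCart rest).map (v :: ·))

-- proof-side: the same product, as key/value pair lists
def pairCart : List (String × List String) → List (List (String × String))
  | [] => [[]]
  | kv :: rest => kv.2.flatMap (fun v => (pairCart rest).map ((kv.1, v) :: ·))

-- proof-side: Nat version of bStrides
def sN : List (String × List String) → List (String × List String × Nat) × Nat
  | [] => ([], 1)
  | kv :: rest =>
      let st := sN rest
      ((kv.1, kv.2, st.2) :: st.1, kv.2.length * st.2)

theorem bStrides_eq_sN (L : List (String × List String)) :
    bStrides L = ((sN L).1.map (fun s => (s.1, s.2.1, (s.2.2 : Int))), ((sN L).2 : Int)) := by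
  induction L with
  | nil => rfl
  | cons kv rest ih => simp [bStrides, sN, ih]

theorem grow_foldl (L : List (String × List String)) (init : List (List String)) :
    L.foldl (fun prod kv => prod.flatMap (fun element => kv.2.map (fun v => element ++ [v]))) init
      = init.flatMap (fun e => (vCart L).map (e ++ ·)) := by
  induction L generalizing init with
  | nil => simp [vCart]
  | cons kv rest ih =>
      simp only [List.foldl_cons]
      rw [ih]
      simp [vCart, List.flatMap_assoc, List.map_flatMap, List.flatMap_map, List.map_map,
        Function.comp_def, List.append_assoc]

theorem vCart_zip (L : List (String × List String)) :
    (vCart L).map (fun e => List.zip (L.map Prod.fst) e) = pairCart L := by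
  induction L with
  | nil => rfl
  | cons kv rest ih =>
      simp only [vCart, pairCart, List.map_cons, List.map_flatMap, List.map_map]
      rw [← ih]
      simp [Function.comp_def, List.map_map]

theorem sN_dvd (L : List (String × List String)) :
    ∀ s ∈ (sN L).1, s.2.2 * s.2.1.length ∣ (sN L).2 := by
  induction L with
  | nil => simp [sN]
  | cons kv rest ih =>
      intro s hs
      simp only [sN, List.mem_cons] at hs ⊢
      rcases hs with h | h
      · subst h; exact ⟨1, by ring⟩
      · exact (ih s h).trans (dvd_mul_left _ _)

theorem range_mul_flatMap (a T : Nat) :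
    List.range (a * T) = (List.range a).flatMap (fun q => (List.range T).map (fun r => q * T + r)) := by
  induction a with
  | zero => simp
  | succ a ih =>
      rw [Nat.succ_mul, List.range_add, List.range_succ, ih]
      simp [List.flatMap_append]

theorem decode_nat (L : List (String × List String)) :
    (List.range (sN L).2).map
      (fun n => (sN L).1.map (fun s => (s.1, s.2.1.getD (n / s.2.2 % s.2.1.length) "")))
      = pairCart L := by
  induction L with
  | nil => simp [sN, pairCart]
  | cons kv rest ih =>
      have hdvd := sN_dvd rest
      simp only [sN, pairCart, List.map_cons]
      rw [range_mul_flatMap, List.map_flatMap]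
      have hcong : ∀ q ∈ List.range kv.2.length,
          (((List.range (sN rest).2).map (fun r => q * (sN rest).2 + r)).map
            (fun n => (kv.1, kv.2.getD (n / (sN rest).2 % kv.2.length) "") ::
              (sN rest).1.map (fun s => (s.1, s.2.1.getD (n / s.2.2 % s.2.1.length) ""))))
          = (pairCart rest).map (fun e => (kv.1, kv.2.getD q "") :: e) := by
        intro q hq
        rw [List.mem_range] at hq
        rw [List.map_map, ← ih, List.map_map]
        refine List.map_congr_left ?_
        intro r hr
        rw [List.mem_range] at hr
        have hT : 0 < (sN rest).2 := Nat.pos_of_ne_zero (by omega)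
        have h1 : (q * (sN rest).2 + r) / (sN rest).2 % kv.2.length = q := by
          rw [Nat.add_comm, Nat.mul_comm, Nat.add_mul_div_left _ _ hT,
            Nat.div_eq_of_lt hr, Nat.zero_add, Nat.mod_eq_of_lt hq]
        have h2 : ∀ s ∈ (sN rest).1,
            (q * (sN rest).2 + r) / s.2.2 % s.2.1.length = r / s.2.2 % s.2.1.length := by
          intro s hs
          obtain ⟨j, hj⟩ := hdvd s hs
          have ht : 0 < s.2.2 := by
            rcases Nat.eq_zero_or_pos s.2.2 with h0 | h0
            · exfalso; rw [h0] at hj; simp at hj; omega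
            · exact h0
          have e1 : q * (sN rest).2 + r = s.2.2 * (q * (s.2.1.length * j)) + r := by
            rw [hj]; ring
          rw [e1, Nat.mul_add_div ht]
          have e2 : q * (s.2.1.length * j) + r / s.2.2
              = s.2.1.length * (q * j) + r / s.2.2 := by ring
          rw [e2, Nat.mul_add_mod]
        simp only [Function.comp]
        rw [h1]
        refine congrArg _ (List.map_congr_left fun s hs => ?_)
        rw [h2 s hs]
      calc ((List.range kv.2.length).flatMap fun q =>
              ((List.range (sN rest).2).map (fun r => q * (sN rest).2 + r)).map
                (fun n => (kv.1, kv.2.getD (n / (sN rest).2 % kv.2.length) "") ::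
                  (sN rest).1.map (fun s => (s.1, s.2.1.getD (n / s.2.2 % s.2.1.length) ""))))
          = (List.range kv.2.length).flatMap (fun q =>
              (pairCart rest).map (fun e => (kv.1, kv.2.getD q "") :: e)) := by
            rw [List.flatMap_def, List.flatMap_def, List.map_congr_left hcong]
        _ = kv.2.flatMap (fun v => (pairCart rest).map (fun e => (kv.1, v) :: e)) := by
            have hself : (List.range kv.2.length).map (fun q => kv.2.getD q "") = kv.2 := by
              apply List.ext_getElem
              · simp
              · intro i h1 h2
                simp [List.getD_eq_getElem?_getD, List.getElem?_eq_getElem h2]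
            conv_rhs => rw [← hself]
            rw [List.flatMap_map]

theorem combos_eq (L : List (String × List String)) :
    ((L.foldl (fun prod kv => prod.flatMap (fun element => kv.2.map (fun v => element ++ [v]))) [[]]).map
        (fun element => PySem.Dict.ofList (List.zip (L.map Prod.fst) element)))
    = (PySem.List.pyRange 0 (bStrides L).2 1).map (fun index =>
        PySem.Dict.ofList ((bStrides L).1.map (fun s =>
          (s.1, PySem.List.pyGetD s.2.1
            (PySem.Int.mod (PySem.Int.floordiv index s.2.2) (s.2.1.length : Int)) "")))) := by
  rw [grow_foldl]
  have hl : ([[]] : List (List String)).flatMap (fun e => (vCart L).map (e ++ ·)) = vCart L := by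
    simp
  have h2 : (vCart L).map (fun element => PySem.Dict.ofList (List.zip (L.map Prod.fst) element))
      = (pairCart L).map PySem.Dict.ofList := by
    rw [← vCart_zip]
    simp [List.map_map, Function.comp_def]
  rw [hl, h2, bStrides_eq_sN, PySem.List.pyRange_zero_natCast, ← decode_nat L,
    List.map_map, List.map_map]
  refine List.map_congr_left fun n _ => ?_
  simp only [Function.comp_def, List.map_map]
  congr 1
  refine List.map_congr_left fun s _ => ?_
  rw [PySem.Int.floordiv_natCast, PySem.Int.mod_natCast, PySem.List.pyGetD_natCast]

-- ===== VERDICT (by name: the statement is the Claim_ definition above) =====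
theorem named_kwargs_product_py_spec : Claim_equal_named_kwargs_product_py := by
  intro L _
  unfold Spec_named_kwargs_product_py named_kwargs_product_py named_kwargs_product_py_alt
  simp only []
  rw [combos_eq L, List.foldl_map]
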